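-- pv_equiv track=rewrite | github.com/EthanHoldn/hilberts-curve | Hilbert_Curve.py | toCords
-- ===== SOURCE A (Python) =====
-- def toCords(steps):
--     points = [[0,0]]
--     for i in steps:
--         if i == "u": points += [[points[-1][0],points[-1][1]+1]]
--         if i == "d": points += [[points[-1][0],points[-1][1]-1]]
--         if i == "l": points += [[points[-1][0]-1,points[-1][1]]]
--         if i == "r": points += [[points[-1][0]+1,points[-1][1]]]
--     return points
-- ===== SOURCE B (Python) =====
-- _DELTAS = {"u": (0, 1), "d": (0, -1), "l": (-1, 0), "r": (1, 0)}
--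
-- def toCords(steps):
--     # Build the path back-to-front: compute the endpoint by summing all deltas,
--     # then walk the moves in reverse, undoing each delta, and flip the list.
--     moves = [_DELTAS[c] for c in steps if c in _DELTAS]
--     x = sum(dx for dx, _ in moves)
--     y = sum(dy for _, dy in moves)
--     out = [[x, y]]
--     for dx, dy in reversed(moves):
--         x -= dx
--         y -= dy
--         out.append([x, y])
--     out.reverse()
--     return out
-- ===== Notes on version B (the rewrite author's own statement) =====
-- stated objective: alternative
-- what changed: B builds the path back-to-front: it first computes the endpoint by summing all deltas, then walks the moves in reverse order undoing each delta and finally reverses the collected list, whereas A grows the path front-to-back by re-reading its last element.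
import Mathlib
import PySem

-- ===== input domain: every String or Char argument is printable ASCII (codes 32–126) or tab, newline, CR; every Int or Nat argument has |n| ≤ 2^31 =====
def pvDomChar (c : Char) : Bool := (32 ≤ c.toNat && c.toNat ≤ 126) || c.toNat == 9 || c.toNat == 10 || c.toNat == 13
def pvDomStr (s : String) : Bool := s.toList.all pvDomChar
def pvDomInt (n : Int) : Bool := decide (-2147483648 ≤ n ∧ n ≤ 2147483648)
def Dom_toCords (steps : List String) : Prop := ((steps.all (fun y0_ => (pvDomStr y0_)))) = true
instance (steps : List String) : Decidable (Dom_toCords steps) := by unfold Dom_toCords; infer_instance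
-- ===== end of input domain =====

-- B builds the same path back-to-front (endpoint by delta totals, then undo deltas in reverse); same output, alternative decomposition.

-- ===== PORT A =====
-- points[-1][0] / points[-1][1]; the .getD defaults are never reached (points is always nonempty, elements are pairs)
def pvLastX (points : List (List Int)) : Int :=
  ((PySem.List.pyGet? points (-1)).getD []).headD 0
def pvLastY (points : List (List Int)) : Int :=
  (PySem.List.pyGet? ((PySem.List.pyGet? points (-1)).getD []) 1).getD 0

def toCordsStep (points : List (List Int)) (i : String) : List (List Int) :=
  let points := if i = "u" then points ++ [[pvLastX points, pvLastY points + 1]] else points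
  let points := if i = "d" then points ++ [[pvLastX points, pvLastY points - 1]] else points
  let points := if i = "l" then points ++ [[pvLastX points - 1, pvLastY points]] else points
  let points := if i = "r" then points ++ [[pvLastX points + 1, pvLastY points]] else points
  points

def toCords (steps : List String) : List (List Int) :=
  steps.foldl toCordsStep [[0, 0]]

-- ===== PORT B =====
def pvDelta? (c : String) : Option (Int × Int) :=
  if c = "u" then some (0, 1)
  else if c = "d" then some (0, -1)
  else if c = "l" then some (-1, 0)
  else if c = "r" then some (1, 0)
  else none

-- state of B's reverse loop: current (x, y) and the list built so far
def pvBackStep (st : Int × Int × List (List Int)) (d : Int × Int) : Int × Int × List (List Int) :=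
  (st.1 - d.1, st.2.1 - d.2, st.2.2 ++ [[st.1 - d.1, st.2.1 - d.2]])

def toCords_alt (steps : List String) : List (List Int) :=
  let moves := steps.filterMap pvDelta?
  let x := (moves.map Prod.fst).sum
  let y := (moves.map Prod.snd).sum
  let st := moves.reverse.foldl pvBackStep (x, y, [[x, y]])
  st.2.2.reverse

-- ===== PRECONDITION & SPEC =====
def Spec_toCords (steps : List String) (out : List (List Int)) : Prop := out = toCords_alt steps
instance (steps : List String) (out : List (List Int)) : Decidable (Spec_toCords steps out) := by unfold Spec_toCords; infer_instance

-- ===== CLAIM (what is proved, stated in full; the proofs are below) =====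
def Claim_equal_toCords : Prop := ∀ (steps : List String), Dom_toCords steps → Spec_toCords steps (toCords steps)

-- ===== LEMMAS AND PROOFS =====

-- forward scan: the common characterisation both ports are reduced to
def pvScan (x y : Int) (ds : List (Int × Int)) : List (List Int) :=
  match ds with
  | [] => [[x, y]]
  | (dx, dy) :: t => [x, y] :: pvScan (x + dx) (y + dy) t

theorem pvLastX_append (acc : List (List Int)) (x y : Int) :
    pvLastX (acc ++ [[x, y]]) = x := by
  simp [pvLastX, PySem.List.pyGet?_neg_one_append_singleton]

theorem pvLastY_append (acc : List (List Int)) (x y : Int) :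
    pvLastY (acc ++ [[x, y]]) = y := by
  simp [pvLastY, PySem.List.pyGet?_neg_one_append_singleton]

theorem pvScan_cons (x y dx dy : Int) (t : List (Int × Int)) :
    pvScan x y ((dx, dy) :: t) = [x, y] :: pvScan (x + dx) (y + dy) t := rfl

theorem loop_eq (steps : List String) :
    ∀ (acc : List (List Int)) (x y : Int),
      steps.foldl toCordsStep (acc ++ [[x, y]])
        = acc ++ pvScan x y (steps.filterMap pvDelta?) := by
  induction steps with
  | nil => intro acc x y; simp [pvScan]
  | cons i t ih =>
    intro acc x y
    simp only [List.foldl_cons, List.filterMap_cons]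
    by_cases hu : i = "u"
    · have : toCordsStep (acc ++ [[x, y]]) i = (acc ++ [[x, y]]) ++ [[x, y + 1]] := by
        simp [toCordsStep, hu, pvLastX_append, pvLastY_append]
      rw [this, hu]
      simpa [pvDelta?, pvScan_cons, List.append_assoc] using
        ih (acc ++ [[x, y]]) x (y + 1)
    · by_cases hd : i = "d"
      · have : toCordsStep (acc ++ [[x, y]]) i = (acc ++ [[x, y]]) ++ [[x, y - 1]] := by
          simp [toCordsStep, hd, pvLastX_append, pvLastY_append]
        rw [this, hd]
        have := ih (acc ++ [[x, y]]) x (y - 1)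
        simp only [List.append_assoc, List.singleton_append] at this
        simpa [pvDelta?, pvScan_cons, List.append_assoc, show y + -1 = y - 1 by ring] using this
      · by_cases hl : i = "l"
        · have : toCordsStep (acc ++ [[x, y]]) i = (acc ++ [[x, y]]) ++ [[x - 1, y]] := by
            simp [toCordsStep, hl, pvLastX_append, pvLastY_append]
          rw [this, hl]
          have := ih (acc ++ [[x, y]]) (x - 1) y
          simpa [pvDelta?, pvScan_cons, List.append_assoc, show x + -1 = x - 1 by ring] using this
        · by_cases hr : i = "r"
          · have : toCordsStep (acc ++ [[x, y]]) i = (acc ++ [[x, y]]) ++ [[x + 1, y]] := by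
              simp [toCordsStep, hr, pvLastX_append, pvLastY_append]
            rw [this, hr]
            simpa [pvDelta?, pvScan_cons, List.append_assoc] using
              ih (acc ++ [[x, y]]) (x + 1) y
          · have : toCordsStep (acc ++ [[x, y]]) i = acc ++ [[x, y]] := by
              simp [toCordsStep, hu, hd, hl, hr]
            rw [this]
            simpa [pvDelta?, hu, hd, hl, hr] using ih acc x y

-- B's reverse loop, seeded with the delta totals, produces the reversed forward scan
theorem back_eq (ds : List (Int × Int)) :
    ∀ (x y : Int),
      ds.foldr (fun d st => pvBackStep st d)
        (x + (ds.map Prod.fst).sum, y + (ds.map Prod.snd).sum,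
          [[x + (ds.map Prod.fst).sum, y + (ds.map Prod.snd).sum]])
        = (x, y, (pvScan x y ds).reverse) := by
  induction ds with
  | nil => intro x y; simp [pvScan]
  | cons d t ih =>
    intro x y
    obtain ⟨dx, dy⟩ := d
    have h := ih (x + dx) (y + dy)
    simp only [List.foldr_cons, List.map_cons, List.sum_cons]
    rw [show x + (dx + (t.map Prod.fst).sum) = (x + dx) + (t.map Prod.fst).sum by ring,
        show y + (dy + (t.map Prod.snd).sum) = (y + dy) + (t.map Prod.snd).sum by ring, h]
    simp [pvBackStep, pvScan_cons]

-- ===== VERDICT (by name: the statement is the Claim_ definition above) =====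
theorem toCords_spec : Claim_equal_toCords := by
  intro steps _
  unfold Spec_toCords toCords toCords_alt
  have hA := loop_eq steps [] 0 0
  simp only [List.nil_append] at hA
  rw [hA]
  have hB := back_eq (steps.filterMap pvDelta?) 0 0
  simp only [zero_add] at hB
  simp only [List.foldl_reverse, hB, List.reverse_reverse]
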